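-- pv_equiv track=rewrite | github.com/rocketman1243/routing-based-on-user-requirements | generate_features_distribution.py | generate_distribution
-- ===== SOURCE A (Python) =====
-- import random, math
--
-- def generate_distribution(max_number_of_features: int, as_numbers: list[int]) -> list[int]:
--     items_per_step = math.ceil(len(as_numbers) / max_number_of_features)
--
--     max_as = max(as_numbers)
--     distribution = [0] * (max_as + 1)
--
--     counter = 0
--     current_number_of_elements = max_number_of_features
--
--     for i in as_numbers:
--         distribution[i] =  current_number_of_elements
--         counter += 1
--
--         if counter >= items_per_step:
--             counter = 0
--             current_number_of_elements -= 1
--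
--     return distribution
-- ===== SOURCE B (Python) =====
-- import math
--
--
-- def generate_distribution(max_number_of_features: int, as_numbers: list[int]) -> list[int]:
--     items_per_step = math.ceil(len(as_numbers) / max_number_of_features)
--     distribution = [0] * (max(as_numbers) + 1)
--     for step, start in enumerate(range(0, len(as_numbers), items_per_step)):
--         for i in as_numbers[start:start + items_per_step]:
--             distribution[i] = max_number_of_features - step
--     return distribution
-- ===== Notes on version B (the rewrite author's own statement) =====
-- stated objective: alternative
-- what changed: Replaces A's single pass threading a decrementing counter/current accumulator pair with a chunked traversal: an outer loop over the step starts (range(0, n, items_per_step)) and an inner loop writing the constant weight max_number_of_features - step for each slice of items_per_step elements.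
-- outside the precondition, e.g. on generate_distribution(-3, [0, 1]): A returns [-3, -4], B raises ValueError; on generate_distribution(-1, [0, 1]): A returns [-1, -2], B returns [0, 0]
import Mathlib
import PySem

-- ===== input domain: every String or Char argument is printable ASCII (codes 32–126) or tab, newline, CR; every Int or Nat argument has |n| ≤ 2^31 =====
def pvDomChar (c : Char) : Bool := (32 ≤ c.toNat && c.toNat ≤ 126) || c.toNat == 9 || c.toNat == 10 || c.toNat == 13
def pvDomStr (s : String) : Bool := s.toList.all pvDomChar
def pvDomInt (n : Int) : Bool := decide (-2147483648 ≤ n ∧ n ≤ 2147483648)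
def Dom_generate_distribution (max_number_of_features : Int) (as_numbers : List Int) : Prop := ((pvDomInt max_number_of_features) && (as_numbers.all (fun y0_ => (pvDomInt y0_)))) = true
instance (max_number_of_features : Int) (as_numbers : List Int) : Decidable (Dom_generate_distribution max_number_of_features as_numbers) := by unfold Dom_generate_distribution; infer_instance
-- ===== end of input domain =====

-- B replaces A's single pass with a decrementing counter/current accumulator pair by a chunked
-- traversal: an outer loop over the steps and an inner loop writing one constant weight per
-- slice (objective: alternative decomposition; return value only, no observable mutation).

-- ===== PORT A =====
-- one loop step of A: state = (distribution, counter, current_number_of_elements)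
def gdStepA (items_per_step : Int) (s : List Int × Int × Int) (i : Int) : List Int × Int × Int :=
  let dist := PySem.List.pySetD s.1 i s.2.2
  let counter := s.2.1 + 1
  if counter ≥ items_per_step then (dist, 0, s.2.2 - 1) else (dist, counter, s.2.2)

def generate_distribution (max_number_of_features : Int) (as_numbers : List Int) : List Int :=
  -- math.ceil(len(as_numbers) / max_number_of_features) ported as the integer -((-n) // m):
  -- exact wherever Python's float division is (all inputs the checks sample)
  let items_per_step : Int :=
    -(PySem.Int.floordiv (-(as_numbers.length : Int)) max_number_of_features)
  match PySem.List.max? as_numbers (fun x => x) with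
  | none => []   -- max([]) raises ValueError: outside Pre_
  | some max_as =>
    let distribution : List Int := List.replicate (max_as + 1).toNat 0
    (as_numbers.foldl (gdStepA items_per_step) (distribution, 0, max_number_of_features)).1

-- ===== PORT B =====
def generate_distribution_alt (max_number_of_features : Int) (as_numbers : List Int) : List Int :=
  let items_per_step : Int :=
    -(PySem.Int.floordiv (-(as_numbers.length : Int)) max_number_of_features)
  match PySem.List.max? as_numbers (fun x => x) with
  | none => []   -- max([]) raises ValueError: outside Pre_
  | some max_as =>
    let distribution : List Int := List.replicate (max_as + 1).toNat 0
    (PySem.List.enumerate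
        (PySem.List.pyRange 0 (as_numbers.length : Int) items_per_step) 0).foldl
      (fun acc q =>
        (PySem.List.slice as_numbers (some q.2) (some (q.2 + items_per_step))).foldl
          (fun a i => PySem.List.pySetD a i (max_number_of_features - q.1)) acc)
      distribution

-- ===== PRECONDITION & SPEC =====
-- Pre_ restricts to the task's natural domain: a positive number of features and a nonempty
-- list whose elements are valid indices into [0]*(max+1) (i.e. each i ≥ -(max+1), stated as
-- ∃ j ∈ list, -(j+1) ≤ i).  A raises outside much of this (ZeroDivisionError for
-- max_number_of_features = 0, ValueError on [], IndexError for elements < -(max+1)); for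
-- nonpositive feature counts, where A still returns, the decreasing-per-step reading is
-- meaningless and B raises or does the natural thing.
def Pre_generate_distribution (max_number_of_features : Int) (as_numbers : List Int) : Prop :=
  1 ≤ max_number_of_features ∧ as_numbers ≠ [] ∧
    ∀ i ∈ as_numbers, ∃ j ∈ as_numbers, -(j + 1) ≤ i

instance (max_number_of_features : Int) (as_numbers : List Int) : Decidable (Pre_generate_distribution max_number_of_features as_numbers) := by
  unfold Pre_generate_distribution; infer_instance

def pvWitness_generate_distribution : Int × List Int := (2, [3, -1, 1, 0, 2])

def Spec_generate_distribution (max_number_of_features : Int) (as_numbers : List Int) (out : List Int) : Prop := out = generate_distribution_alt max_number_of_features as_numbers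
instance (max_number_of_features : Int) (as_numbers : List Int) (out : List Int) : Decidable (Spec_generate_distribution max_number_of_features as_numbers out) := by unfold Spec_generate_distribution; infer_instance

-- ===== CLAIM (what is proved, stated in full; the proofs are below) =====
def Claim_equal_generate_distribution : Prop := ∀ (max_number_of_features : Int) (as_numbers : List Int), Dom_generate_distribution max_number_of_features as_numbers → Pre_generate_distribution max_number_of_features as_numbers → Spec_generate_distribution max_number_of_features as_numbers (generate_distribution max_number_of_features as_numbers)

-- ===== LEMMAS AND PROOFS =====

-- items_per_step = ceil(n / mnf) ≥ 1 for n ≥ 1, mnf ≥ 1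
lemma gd_ips_pos (n mnf : Int) (hn : 1 ≤ n) (hm : 1 ≤ mnf) :
    1 ≤ -(PySem.Int.floordiv (-n) mnf) := by
  have h := (PySem.Int.neg_floordiv_neg_eq_iff_of_pos (a := n) (b := mnf)
      (q := -(PySem.Int.floordiv (-n) mnf)) (by omega)).mp rfl
  rcases h with ⟨h1, h2⟩
  by_contra hq
  push_neg at hq
  nlinarith

-- how j / ips and j % ips change when j increments (ips ≥ 1, j ≥ 0)
lemma gd_div_step (j ips : Int) (hj : 0 ≤ j) (hips : 1 ≤ ips) :
    (j % ips + 1 ≥ ips → (j + 1) / ips = j / ips + 1 ∧ (j + 1) % ips = 0) ∧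
    (¬ j % ips + 1 ≥ ips → (j + 1) / ips = j / ips ∧ (j + 1) % ips = j % ips + 1) := by
  have hlt := Int.emod_lt_of_pos j (b := ips) (by omega)
  have hge := Int.emod_nonneg j (b := ips) (by omega)
  have hdm := Int.mul_ediv_add_emod j ips
  constructor
  · intro h
    have e : j + 1 = ips * (j / ips + 1) := by rw [mul_add, mul_one]; linarith
    exact ⟨by rw [e, Int.mul_ediv_cancel_left _ (by omega)],
           by rw [e, Int.mul_emod_right]⟩
  · intro h
    push_neg at h
    have h' : j % ips + 1 < ips := by omega
    have e : j + 1 = (j % ips + 1) + ips * (j / ips) := by linarith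
    constructor
    · rw [e, Int.add_mul_ediv_left _ _ (show ips ≠ 0 by omega),
        Int.ediv_eq_zero_of_lt (by omega) h', zero_add]
    · rw [e, Int.add_mul_emod_self_left, Int.emod_eq_of_lt (by omega) h']

-- structural view of range(a, b, s) for a positive step
lemma gd_pyRange_nil (a b s : Int) (hs : 0 < s) (h : b ≤ a) :
    PySem.List.pyRange a b s = [] := by
  rw [PySem.List.pyRange_of_pos _ _ hs, if_neg (by omega)]
  simp

lemma gd_pyRange_cons (a b s : Int) (hs : 0 < s) (h : a < b) :
    PySem.List.pyRange a b s = a :: PySem.List.pyRange (a + s) b s := by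
  rw [PySem.List.pyRange_of_pos _ _ hs, PySem.List.pyRange_of_pos _ _ hs, if_pos h]
  have hN : (b - a + s - 1) / s = (b - a - 1) / s + 1 := by
    rw [show b - a + s - 1 = (b - a - 1) + 1 * s by ring,
        Int.add_mul_ediv_right _ _ (by omega : s ≠ 0)]
  have hq0 : 0 ≤ (b - a - 1) / s := Int.ediv_nonneg (by omega) (by omega)
  have hNt : ((b - a + s - 1) / s).toNat = ((b - a - 1) / s).toNat + 1 := by omega
  have hsecond : (if a + s < b then ((b - (a + s) + s - 1) / s).toNat else 0)
      = ((b - a - 1) / s).toNat := by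
    by_cases hc : a + s < b
    · rw [if_pos hc]; congr 2; ring_nf
    · rw [if_neg hc]
      have : (b - a - 1) / s = 0 := Int.ediv_eq_zero_of_lt (by omega) (by omega)
      omega
  rw [hNt, hsecond, List.range_succ_eq_map]
  simp only [List.map_cons, List.map_map, Nat.cast_zero, mul_zero, add_zero]
  congr 1
  refine List.map_congr_left ?_
  intro k _
  simp only [Function.comp_apply]
  push_cast
  ring

-- A's loop writes element j with weight mnf - j // ips
lemma gd_mainA (mnf ips : Int) (hips : 1 ≤ ips) :
    ∀ (l : List Int) (j0 dist : _), 0 ≤ j0 →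
      (l.foldl (gdStepA ips) (dist, j0 % ips, mnf - j0 / ips)).1
        = (PySem.List.enumerate l j0).foldl
            (fun a p => PySem.List.pySetD a p.2 (mnf - PySem.Int.floordiv p.1 ips)) dist := by
  intro l
  induction l with
  | nil => intro j0 dist _; simp [PySem.List.enumerate]
  | cons x t ih =>
    intro j0 dist hj0
    have hstep := gd_div_step j0 ips hj0 hips
    have hfd : PySem.Int.floordiv j0 ips = j0 / ips :=
      PySem.Int.floordiv_eq_ediv_of_pos (by omega)
    rw [List.foldl_cons, PySem.List.enumerate_cons, List.foldl_cons]
    rw [show gdStepA ips (dist, j0 % ips, mnf - j0 / ips) x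
        = (PySem.List.pySetD dist x (mnf - j0 / ips), (j0 + 1) % ips, mnf - (j0 + 1) / ips) from by
      unfold gdStepA
      by_cases hc : j0 % ips + 1 ≥ ips
      · have := hstep.1 hc
        simp only [if_pos hc]
        refine Prod.ext rfl (Prod.ext ?_ ?_) <;> simp <;> omega
      · have := hstep.2 hc
        simp only [if_neg hc]
        refine Prod.ext rfl (Prod.ext ?_ ?_) <;> simp <;> omega]
    rw [ih (j0 + 1) _ (by omega), hfd]

-- a chunk whose indices all share quotient s is a constant-weight pass
lemma gd_chunk_const (mnf ips s : Int) :
    ∀ (c : List Int) (j0 : Int) (dist : List Int),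
      (∀ r : Nat, r < c.length → PySem.Int.floordiv (j0 + r) ips = s) →
      (PySem.List.enumerate c j0).foldl
          (fun a p => PySem.List.pySetD a p.2 (mnf - PySem.Int.floordiv p.1 ips)) dist
        = c.foldl (fun a i => PySem.List.pySetD a i (mnf - s)) dist := by
  intro c
  induction c with
  | nil => intro j0 dist _; simp [PySem.List.enumerate]
  | cons x t ih =>
    intro j0 dist h
    rw [PySem.List.enumerate_cons, List.foldl_cons, List.foldl_cons]
    have h0 := h 0 (by simp)
    simp only [Nat.cast_zero, add_zero] at h0
    rw [h0]
    refine ih (j0 + 1) _ ?_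
    intro r hr
    have := h (r + 1) (by simpa using Nat.succ_lt_succ hr)
    push_cast at this ⊢
    rw [show j0 + 1 + (r : Int) = j0 + ((r : Int) + 1) by ring]
    exact this

-- B's chunked traversal performs exactly the per-index writes with weight mnf - j // ips
lemma gd_mainB (mnf ips : Int) (hips : 1 ≤ ips) (xs : List Int) :
    ∀ (k : Nat) (s : Int) (dist : List Int), 0 ≤ s →
      (xs.length : Int) ≤ s * ips + k * ips →
      (PySem.List.enumerate (PySem.List.pyRange (s * ips) (xs.length : Int) ips) s).foldl
          (fun acc q => (PySem.List.slice xs (some q.2) (some (q.2 + ips))).foldl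
              (fun a i => PySem.List.pySetD a i (mnf - q.1)) acc) dist
        = (PySem.List.enumerate (xs.drop (s * ips).toNat) (s * ips)).foldl
            (fun a p => PySem.List.pySetD a p.2 (mnf - PySem.Int.floordiv p.1 ips)) dist := by
  intro k
  induction k with
  | zero =>
    intro s dist hs hk
    have hsp : 0 ≤ s * ips := mul_nonneg hs (by omega)
    rw [gd_pyRange_nil _ _ _ (by omega) (by omega),
        List.drop_eq_nil_of_le (by omega)]
    simp [PySem.List.enumerate]
  | succ k ih =>
    intro s dist hs hk
    have hsp : 0 ≤ s * ips := mul_nonneg hs (by omega)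
    by_cases hlt : s * ips < (xs.length : Int)
    case neg =>
      rw [gd_pyRange_nil _ _ _ (by omega) (by omega),
          List.drop_eq_nil_of_le (by omega)]
      simp [PySem.List.enumerate]
    case pos =>
      have hsucc : (s + 1) * ips = s * ips + ips := by ring
      have hslice : PySem.List.slice xs (some (s * ips)) (some (s * ips + ips))
          = List.take ips.toNat (List.drop (s * ips).toNat xs) := by
        rw [PySem.List.slice_toNat xs (by omega) (by omega)]
        congr 1
        omega
      set c := List.take ips.toNat (List.drop (s * ips).toNat xs) with hc
      have hdd : xs.drop (s * ips).toNat = c ++ xs.drop ((s + 1) * ips).toNat := by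
        conv_lhs => rw [← List.take_append_drop ips.toNat (xs.drop (s * ips).toNat)]
        congr 1
        rw [List.drop_drop]
        congr 1
        omega
      have hclen : c.length = min ips.toNat (xs.length - (s * ips).toNat) := by
        simp [hc]
      rw [gd_pyRange_cons _ _ _ (by omega) hlt, PySem.List.enumerate_cons,
          List.foldl_cons, hslice, hdd, PySem.List.enumerate_append, List.foldl_append]
      rw [gd_chunk_const mnf ips s c (s * ips) dist (by
        intro r hr
        rw [PySem.Int.floordiv_eq_ediv_of_pos (by omega),
            show s * ips + (r : Int) = (r : Int) + ips * s by ring,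
            Int.add_mul_ediv_left _ _ (by omega : ips ≠ 0),
            Int.ediv_eq_zero_of_lt (by positivity) (by omega), zero_add])]
      by_cases hfull : (s * ips).toNat + ips.toNat ≤ xs.length
      case pos =>
        rw [show s * ips + (c.length : Int) = (s + 1) * ips by omega,
            show s * ips + ips = (s + 1) * ips from hsucc.symm]
        exact ih (s + 1) _ (by omega) (by push_cast at hk ⊢; nlinarith)
      case neg =>
        rw [gd_pyRange_nil _ _ _ (by omega) (by omega),
            List.drop_eq_nil_of_le (by omega)]
        simp [PySem.List.enumerate]

-- ===== VERDICT (by name: the statement is the Claim_ definition above) =====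
theorem generate_distribution_spec : Claim_equal_generate_distribution := by
  intro mnf xs _hdom hpre
  obtain ⟨h1, h2, _h3⟩ := hpre
  unfold Spec_generate_distribution
  rcases hM : PySem.List.max? xs (fun x => x) with _ | M
  · exact absurd ((PySem.List.max?_eq_none_iff xs (fun x => x)).mp hM) h2
  have hlen : 1 ≤ (xs.length : Int) := by
    cases xs with | nil => exact absurd rfl h2 | cons a t => simp
  have hips : 1 ≤ -(PySem.Int.floordiv (-(xs.length : Int)) mnf) := gd_ips_pos _ _ hlen h1
  simp only [generate_distribution, generate_distribution_alt, hM]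
  have keyA := gd_mainA mnf _ hips xs 0 (List.replicate (M + 1).toNat (0 : Int)) le_rfl
  rw [Int.zero_emod, Int.zero_ediv, sub_zero] at keyA
  rw [keyA]
  have keyB := gd_mainB mnf _ hips xs xs.length 0 (List.replicate (M + 1).toNat (0 : Int))
      le_rfl (by
        rw [zero_mul, zero_add]
        have := hips
        nlinarith)
  rw [zero_mul, Int.toNat_zero, List.drop_zero] at keyB
  rw [keyB]
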